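-- pv_equiv track=rewrite | github.com/ananyag309/sahayak | adk-agents/differentiated_materials/sub_agents/grade_detection/tools/grade_identification_tool.py | assess_vocabulary_level
-- ===== SOURCE A (Python) =====
-- def assess_vocabulary_level(vocabulary):
--     """Assess vocabulary complexity level."""
--
--     if not vocabulary:
--         return 'basic'
--
--     # Simple heuristic based on vocabulary complexity
--     complex_indicators = ['synthesis', 'analysis', 'hypothesis', 'correlation', 'synthesis']
--     academic_indicators = ['process', 'concept', 'function', 'structure', 'system']
--
--     complex_count = sum(1 for word in vocabulary if any(indicator in word.lower() for indicator in complex_indicators))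
--     academic_count = sum(1 for word in vocabulary if any(indicator in word.lower() for indicator in academic_indicators))
--
--     if complex_count > 2:
--         return 'advanced'
--     elif academic_count > 2:
--         return 'academic'
--     else:
--         return 'basic'
-- ===== SOURCE B (Python) =====
-- def assess_vocabulary_level(vocabulary):
--     """Assess vocabulary complexity level (streaming scan with early decision)."""
--
--     if not vocabulary:
--         return 'basic'
--
--     complex_indicators = ['synthesis', 'analysis', 'hypothesis', 'correlation', 'synthesis']
--     academic_indicators = ['process', 'concept', 'function', 'structure', 'system']
--
--     complex_count = 0
--     academic_count = 0
--     for word in vocabulary: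
--         w = word.lower()
--         if any(indicator in w for indicator in complex_indicators):
--             complex_count += 1
--             if complex_count > 2:
--                 # The verdict is already determined: 'advanced' wins over
--                 # everything else, so the rest of the list is never examined.
--                 return 'advanced'
--         if any(indicator in w for indicator in academic_indicators):
--             academic_count += 1
--     return 'academic' if academic_count > 2 else 'basic'
-- ===== Notes on version B (the rewrite author's own statement) =====
-- stated objective: alternative
-- what changed: Replaces A's two full counting passes followed by an offline branch chain with a single streaming scan that decides online: it returns 'advanced' the moment the third complex word is seen (the remaining words are never lowercased or scanned), and only the academic count survives to the end of the scan.
import Mathlib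
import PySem

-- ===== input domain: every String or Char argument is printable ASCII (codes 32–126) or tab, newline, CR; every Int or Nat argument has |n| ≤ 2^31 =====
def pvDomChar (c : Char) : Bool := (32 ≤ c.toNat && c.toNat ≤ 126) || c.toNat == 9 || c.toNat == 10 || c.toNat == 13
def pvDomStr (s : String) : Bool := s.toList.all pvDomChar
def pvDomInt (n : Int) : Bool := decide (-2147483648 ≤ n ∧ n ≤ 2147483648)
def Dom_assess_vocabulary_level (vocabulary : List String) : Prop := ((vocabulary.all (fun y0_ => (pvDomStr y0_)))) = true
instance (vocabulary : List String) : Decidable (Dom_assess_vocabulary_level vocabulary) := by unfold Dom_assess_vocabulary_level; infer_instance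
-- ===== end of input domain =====

-- ===== PORT A =====
-- B changes: one streaming scan that returns 'advanced' as soon as the third complex word
-- is seen and checks the academic count only at the end, instead of A's two full counting
-- passes followed by the branch chain (objective: alternative; same output).
def pvComplexIndicators : List String := ["synthesis", "analysis", "hypothesis", "correlation", "synthesis"]
def pvAcademicIndicators : List String := ["process", "concept", "function", "structure", "system"]

def assess_vocabulary_level (vocabulary : List String) : String :=
  if vocabulary = [] then "basic"
  else
    let complex_count : Int := vocabulary.foldl (fun acc word =>
      if pvComplexIndicators.any (fun indicator => PySem.Str.isIn indicator (PySem.Str.lower word)) then acc + 1 else acc) 0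
    let academic_count : Int := vocabulary.foldl (fun acc word =>
      if pvAcademicIndicators.any (fun indicator => PySem.Str.isIn indicator (PySem.Str.lower word)) then acc + 1 else acc) 0
    if complex_count > 2 then "advanced"
    else if academic_count > 2 then "academic"
    else "basic"

-- ===== PORT B =====
-- the streaming loop of Source B: early return "advanced" inside the scan
def pvGoB : List String → Int → Int → String
  | [], _, academic_count => if academic_count > 2 then "academic" else "basic"
  | word :: rest, complex_count, academic_count =>
    let w := PySem.Str.lower word
    if pvComplexIndicators.any (fun indicator => PySem.Str.isIn indicator w) then
      if complex_count + 1 > 2 then "advanced"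
      else pvGoB rest (complex_count + 1)
             (if pvAcademicIndicators.any (fun indicator => PySem.Str.isIn indicator w) then academic_count + 1 else academic_count)
    else pvGoB rest complex_count
           (if pvAcademicIndicators.any (fun indicator => PySem.Str.isIn indicator w) then academic_count + 1 else academic_count)

def assess_vocabulary_level_alt (vocabulary : List String) : String :=
  if vocabulary = [] then "basic"
  else pvGoB vocabulary 0 0

-- ===== PRECONDITION & SPEC =====
def Spec_assess_vocabulary_level (vocabulary : List String) (out : String) : Prop := out = assess_vocabulary_level_alt vocabulary
instance (vocabulary : List String) (out : String) : Decidable (Spec_assess_vocabulary_level vocabulary out) := by unfold Spec_assess_vocabulary_level; infer_instance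

-- ===== CLAIM (what is proved, stated in full; the proofs are below) =====
def Claim_equal_assess_vocabulary_level : Prop := ∀ (vocabulary : List String), Dom_assess_vocabulary_level vocabulary → Spec_assess_vocabulary_level vocabulary (assess_vocabulary_level vocabulary)

-- ===== LEMMAS AND PROOFS =====
def pvCM (word : String) : Bool := pvComplexIndicators.any (fun indicator => PySem.Str.isIn indicator (PySem.Str.lower word))
def pvAM (word : String) : Bool := pvAcademicIndicators.any (fun indicator => PySem.Str.isIn indicator (PySem.Str.lower word))

def pvCount (p : String → Bool) (l : List String) : Int :=
  l.foldl (fun acc word => if p word then acc + 1 else acc) 0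

theorem pvCount_shift (p : String → Bool) (l : List String) (c : Int) :
    l.foldl (fun acc word => if p word then acc + 1 else acc) c = c + pvCount p l := by
  induction l generalizing c with
  | nil => simp [pvCount]
  | cons w t ih =>
    simp only [pvCount, List.foldl_cons] at *
    rw [ih, ih (if p w then 0 + 1 else 0)]
    split_ifs <;> omega

theorem pvCount_nonneg (p : String → Bool) (l : List String) : 0 ≤ pvCount p l := by
  induction l with
  | nil => simp [pvCount]
  | cons w t ih =>
    simp only [pvCount, List.foldl_cons]
    rw [pvCount_shift]
    split_ifs <;> omega

theorem pvGoB_spec (l : List String) (c a : Int) (hc : c ≤ 2) :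
    pvGoB l c a =
      if c + pvCount pvCM l > 2 then "advanced"
      else if a + pvCount pvAM l > 2 then "academic"
      else "basic" := by
  induction l generalizing c a with
  | nil =>
    simp only [pvGoB, pvCount, List.foldl_nil, add_zero]
    rw [if_neg (show ¬ c > 2 by omega)]
  | cons w t ih =>
    have hC : pvCount pvCM (w :: t) = (if pvCM w then (1:Int) else 0) + pvCount pvCM t := by
      simp only [pvCount, List.foldl_cons]
      rw [pvCount_shift]
      simp only [pvCount]
      split_ifs <;> omega
    have hA : pvCount pvAM (w :: t) = (if pvAM w then (1:Int) else 0) + pvCount pvAM t := by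
      simp only [pvCount, List.foldl_cons]
      rw [pvCount_shift]
      simp only [pvCount]
      split_ifs <;> omega
    have hnn := pvCount_nonneg pvCM t
    show (if pvCM w then
            if c + 1 > 2 then "advanced"
            else pvGoB t (c + 1) (if pvAM w then a + 1 else a)
          else pvGoB t c (if pvAM w then a + 1 else a)) = _
    rw [hC, hA]
    by_cases hcm : pvCM w
    · rw [if_pos hcm]
      by_cases hfull : c + 1 > 2
      · rw [if_pos hfull]
        split_ifs <;> first | rfl | omega
      · rw [if_neg hfull, ih (c + 1) _ (by omega)]
        split_ifs <;> first | rfl | omega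
    · rw [if_neg hcm, ih c _ hc]
      split_ifs <;> first | rfl | omega

-- ===== VERDICT (by name: the statement is the Claim_ definition above) =====
theorem assess_vocabulary_level_spec : Claim_equal_assess_vocabulary_level := by
  intro vocabulary _
  unfold Spec_assess_vocabulary_level assess_vocabulary_level assess_vocabulary_level_alt
  by_cases h : vocabulary = []
  · simp [h]
  · simp only [h, if_false]
    rw [pvGoB_spec vocabulary 0 0 (by omega)]
    simp [pvCount, pvCM, pvAM]
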